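-- pv_equiv track=rewrite | github.com/Golam-Tawhid/BioInformatics | Task 2/Task2.py | dnaSequence
-- ===== SOURCE A (Python) =====
-- def dnaSequence(arr):
--     fin=""
--     for i in range(len(arr)):
--         for j in range(i,len(arr)):
--             if arr[i][-1]==arr[j][0]:
--                 fin+=arr[i]
--                 fin+=arr[j]
--
--     return fin
-- ===== SOURCE B (Python) =====
-- def dnaSequence(arr):
--     # One backward pass with a first-char index: for each i we look up the
--     # already-indexed positions j >= i whose first char equals arr[i]'s last
--     # char, instead of rescanning arr[i:] for every i.
--     index = {}   # first char -> indices >= current i, in descending order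
--     chunks = []
--     for i in range(len(arr) - 1, -1, -1):
--         s = arr[i]
--         index.setdefault(s[0], []).append(i)
--         chunks.append("".join(s + arr[j] for j in reversed(index.get(s[-1], []))))
--     chunks.reverse()
--     return "".join(chunks)
-- ===== Notes on version B (the rewrite author's own statement) =====
-- stated objective: faster
-- what changed: Instead of A's nested O(n^2) scan comparing arr[i][-1] to arr[j][0] for every pair, B makes one backward pass that maintains a dict from first character to the descending list of indices already seen (all j >= i), looks up arr[i]'s last character to get exactly the matching j's, and joins per-i chunks at the end instead of repeated string +=.
import Mathlib
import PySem

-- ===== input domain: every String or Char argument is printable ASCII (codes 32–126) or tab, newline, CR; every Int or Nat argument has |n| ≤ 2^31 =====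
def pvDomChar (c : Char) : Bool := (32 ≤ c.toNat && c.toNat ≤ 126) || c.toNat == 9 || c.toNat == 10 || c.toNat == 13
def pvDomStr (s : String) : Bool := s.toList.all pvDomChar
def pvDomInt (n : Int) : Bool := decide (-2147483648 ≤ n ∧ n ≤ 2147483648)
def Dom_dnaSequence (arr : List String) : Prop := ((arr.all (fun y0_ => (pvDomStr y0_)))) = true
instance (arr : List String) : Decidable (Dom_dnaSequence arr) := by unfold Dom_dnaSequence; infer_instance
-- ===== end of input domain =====

-- B replaces A's nested pairwise scan by one backward pass with a first-char index (dict) and a final join (faster).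

-- ===== PORT A =====
def dnaSequence (arr : List String) : String :=
  (PySem.List.pyRange 0 arr.length 1).foldl (fun fin i =>
    (PySem.List.pyRange i arr.length 1).foldl (fun fin j =>
      if PySem.Str.pyGet? (PySem.List.pyGetD arr i "") (-1)
           = PySem.Str.pyGet? (PySem.List.pyGetD arr j "") 0 then
        fin ++ PySem.List.pyGetD arr i "" ++ PySem.List.pyGetD arr j ""
      else fin) fin) ""

-- ===== PORT B =====
-- step of B's backward loop: add i under arr[i]'s first char, then emit the chunk for arr[i]'s last char
def dnaSequenceAltStep (arr : List String) (st : PySem.Dict Char (List Int) × List String) (i : Int) :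
    PySem.Dict Char (List Int) × List String :=
  let s := PySem.List.pyGetD arr i ""
  let c0 := (PySem.Str.pyGet? s 0).getD ' '
  let index := st.1.insert c0 (st.1.getD c0 [] ++ [i])
  let cl := (PySem.Str.pyGet? s (-1)).getD ' '
  let chunk := PySem.Str.join ""
    (((index.getD cl []).reverse).map (fun j => s ++ PySem.List.pyGetD arr j ""))
  (index, st.2 ++ [chunk])

def dnaSequence_alt (arr : List String) : String :=
  PySem.Str.join ""
    (((PySem.List.pyRange ((arr.length : Int) - 1) (-1) (-1)).foldl
      (dnaSequenceAltStep arr) (PySem.Dict.empty, [])).2.reverse)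

-- ===== PRECONDITION & SPEC =====
-- Pre_ excludes exactly the inputs where Python A raises IndexError: any empty string in arr.
def Pre_dnaSequence (arr : List String) : Prop := ∀ s ∈ arr, s ≠ ""
instance (arr : List String) : Decidable (Pre_dnaSequence arr) := by unfold Pre_dnaSequence; infer_instance
def pvWitness_dnaSequence : List String := ["AT", "TG"]

def Spec_dnaSequence (arr : List String) (out : String) : Prop := out = dnaSequence_alt arr
instance (arr : List String) (out : String) : Decidable (Spec_dnaSequence arr out) := by unfold Spec_dnaSequence; infer_instance

-- ===== CLAIM (what is proved, stated in full; the proofs are below) =====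
def Claim_equal_dnaSequence : Prop :=
  ∀ (arr : List String), Dom_dnaSequence arr → Pre_dnaSequence arr → Spec_dnaSequence arr (dnaSequence arr)

-- ===== LEMMAS AND PROOFS =====

-- first / last character of arr[i], with B's defaults
def pvFc (arr : List String) (i : Int) : Char := (PySem.Str.pyGet? (PySem.List.pyGetD arr i "") 0).getD ' '
def pvLc (arr : List String) (i : Int) : Char := (PySem.Str.pyGet? (PySem.List.pyGetD arr i "") (-1)).getD ' '

-- the canonical per-i chunk, as a character list
def pvChunk (arr : List String) (i : Int) : List Char :=
  ((PySem.List.pyRange i arr.length 1).filter (fun j => pvFc arr j = pvLc arr i)).flatMap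
    (fun j => (PySem.List.pyGetD arr i "").toList ++ (PySem.List.pyGetD arr j "").toList)

-- descending match list the dict stores for char c once indices ≥ k are processed
def pvDesc (arr : List String) (k : Int) (c : Char) : List Int :=
  ((PySem.List.pyRange k arr.length 1).filter (fun j => pvFc arr j = c)).reverse

lemma pv_join_nil_toList (l : List String) :
    (PySem.Str.join "" l).toList = (l.map String.toList).flatten := by
  rw [PySem.Str.toList_join]
  induction l with
  | nil => simp [PySem.Chars.join_nil]
  | cons a t ih =>
    cases t with
    | nil => simp [PySem.Chars.join_singleton]
    | cons b r => simpa [PySem.Chars.join_cons_cons] using ih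

lemma pv_pyGet?_some {s : String} (h : s ≠ "") :
    PySem.Str.pyGet? s 0 = some ((PySem.Str.pyGet? s 0).getD ' ')
      ∧ PySem.Str.pyGet? s (-1) = some ((PySem.Str.pyGet? s (-1)).getD ' ') := by
  have hne : s.toList ≠ [] := fun hnil => h (String.toList_inj.mp (by simp [hnil]))
  constructor
  · cases hl : s.toList with
    | nil => exact absurd hl hne
    | cons c t => simp [hl]
  · obtain ⟨a, ha⟩ := Option.isSome_iff_exists.mp (List.getLast?_isSome.mpr hne)
    simp [PySem.List.pyGet?_neg_one, ha]

-- A's inner loop over an arbitrary index list, on toList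
lemma pv_innerA (arr : List String) (hpre : Pre_dnaSequence arr) (i : Int)
    (hi : PySem.List.pyGetD arr i "" ∈ arr) :
    ∀ (l : List Int) (fin : String), (∀ j ∈ l, PySem.List.pyGetD arr j "" ∈ arr) →
    (l.foldl (fun fin j =>
      if PySem.Str.pyGet? (PySem.List.pyGetD arr i "") (-1)
           = PySem.Str.pyGet? (PySem.List.pyGetD arr j "") 0 then
        fin ++ PySem.List.pyGetD arr i "" ++ PySem.List.pyGetD arr j ""
      else fin) fin).toList
    = fin.toList ++ (l.filter (fun j => pvFc arr j = pvLc arr i)).flatMap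
        (fun j => (PySem.List.pyGetD arr i "").toList ++ (PySem.List.pyGetD arr j "").toList) := by
  intro l
  induction l with
  | nil => intro fin _; simp
  | cons j t ih =>
    intro fin hmem
    have hji : PySem.List.pyGetD arr j "" ∈ arr := hmem j (by simp)
    have hsi := pv_pyGet?_some (hpre _ hi)
    have hsj := pv_pyGet?_some (hpre _ hji)
    have hcond : (PySem.Str.pyGet? (PySem.List.pyGetD arr i "") (-1)
        = PySem.Str.pyGet? (PySem.List.pyGetD arr j "") 0) ↔ (pvFc arr j = pvLc arr i) := by
      rw [hsi.2, hsj.1, Option.some_inj]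
      unfold pvFc pvLc
      exact eq_comm
    simp only [List.foldl_cons, List.filter_cons]
    by_cases h : pvFc arr j = pvLc arr i
    · rw [if_pos (hcond.mpr h)]
      rw [ih _ (fun x hx => hmem x (by simp [hx]))]
      simp [h]
    · rw [if_neg (fun hc => h (hcond.mp hc))]
      rw [ih _ (fun x hx => hmem x (by simp [hx]))]
      simp [h]

-- A's outer loop, on toList
lemma pv_outerA (arr : List String) (hpre : Pre_dnaSequence arr) :
    ∀ (l : List Int) (fin : String), (∀ i ∈ l, 0 ≤ i ∧ i < (arr.length : Int)) →
    (l.foldl (fun fin i =>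
      (PySem.List.pyRange i arr.length 1).foldl (fun fin j =>
        if PySem.Str.pyGet? (PySem.List.pyGetD arr i "") (-1)
             = PySem.Str.pyGet? (PySem.List.pyGetD arr j "") 0 then
          fin ++ PySem.List.pyGetD arr i "" ++ PySem.List.pyGetD arr j ""
        else fin) fin) fin).toList
    = fin.toList ++ l.flatMap (pvChunk arr) := by
  intro l
  induction l with
  | nil => intro fin _; simp
  | cons i t ih =>
    intro fin hmem
    obtain ⟨hi0, hin⟩ := hmem i (by simp)
    have hiarr : PySem.List.pyGetD arr i "" ∈ arr :=
      PySem.List.pyGetD_mem arr "" (by simp [PySem.Raise.InRange]; omega)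
    simp only [List.foldl_cons]
    rw [ih _ (fun x hx => hmem x (by simp [hx]))]
    rw [pv_innerA arr hpre i hiarr _ fin (fun j hj => by
      have := (PySem.List.mem_pyRange_one).mp hj
      exact PySem.List.pyGetD_mem arr "" (by simp [PySem.Raise.InRange]; omega))]
    simp [pvChunk]

-- the dict invariant: one step of B preserves it, and the emitted chunk is pvChunk
lemma pv_desc_cons (arr : List String) (k : Nat) (hk : k < arr.length) (c : Char) :
    pvDesc arr (k : Int) c
      = if pvFc arr (k : Int) = c then pvDesc arr ((k : Int) + 1) c ++ [(k : Int)]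
        else pvDesc arr ((k : Int) + 1) c := by
  unfold pvDesc
  rw [PySem.List.pyRange_one_cons (by omega), List.filter_cons]
  by_cases h : pvFc arr (k : Int) = c
  · simp [h]
  · simp [h]

lemma pv_step (arr : List String) (k : Nat) (hk : k < arr.length)
    (d : PySem.Dict Char (List Int)) (cs : List String)
    (hd : ∀ c, d.getD c [] = pvDesc arr ((k : Int) + 1) c) :
    dnaSequenceAltStep arr (d, cs) (k : Int)
      = (d.insert (pvFc arr k) (d.getD (pvFc arr k) [] ++ [(k : Int)]),
         cs ++ [String.ofList (pvChunk arr k)]) := by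
  unfold dnaSequenceAltStep
  refine Prod.ext rfl ?_
  simp only
  congr 1
  have hget : (d.insert ((PySem.Str.pyGet? (PySem.List.pyGetD arr (k : Int) "") 0).getD ' ')
        (d.getD ((PySem.Str.pyGet? (PySem.List.pyGetD arr (k : Int) "") 0).getD ' ') [] ++ [(k : Int)])).getD
        ((PySem.Str.pyGet? (PySem.List.pyGetD arr (k : Int) "") (-1)).getD ' ') []
      = pvDesc arr (k : Int) ((PySem.Str.pyGet? (PySem.List.pyGetD arr (k : Int) "") (-1)).getD ' ') := by
    rw [PySem.Dict.getD_insert, pv_desc_cons arr k hk]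
    by_cases h : ((PySem.Str.pyGet? (PySem.List.pyGetD arr (k : Int) "") (-1)).getD ' ')
        = ((PySem.Str.pyGet? (PySem.List.pyGetD arr (k : Int) "") 0).getD ' ')
    · rw [if_pos h, if_pos (by unfold pvFc; exact h.symm), hd, h]
    · rw [if_neg h, if_neg (by unfold pvFc; exact fun hc => h hc.symm), hd]
  congr 1
  rw [hget]
  unfold pvDesc
  rw [List.reverse_reverse]
  apply String.toList_inj.mp
  rw [pv_join_nil_toList]
  simp [pvChunk, pvFc, pvLc, List.flatMap, List.map_map, Function.comp_def]

-- B's backward fold, by induction on how many indices remain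
lemma pv_foldB (arr : List String) :
    ∀ (k : Nat), k ≤ arr.length → ∀ (d : PySem.Dict Char (List Int)) (cs : List String),
    (∀ c, d.getD c [] = pvDesc arr (k : Int) c) →
    ((PySem.List.pyRange ((k : Int) - 1) (-1) (-1)).foldl (dnaSequenceAltStep arr) (d, cs)).2
      = cs ++ (((PySem.List.pyRange 0 (k : Int) 1).map (fun i => String.ofList (pvChunk arr i))).reverse) := by
  intro k
  induction k with
  | zero =>
    intro _ d cs _
    rw [PySem.List.pyRange_neg_one_eq_nil (by norm_num)]
    simp [PySem.List.pyRange_one_eq_nil]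
  | succ m ih =>
    intro hk d cs hd
    have hcons : PySem.List.pyRange ((((m : Nat) + 1 : Nat) : Int) - 1) (-1) (-1)
        = (m : Int) :: PySem.List.pyRange ((m : Int) - 1) (-1) (-1) := by
      push_cast
      rw [show (m : Int) + 1 - 1 = (m : Int) by ring]
      exact PySem.List.pyRange_neg_one_cons (by omega)
    rw [hcons]
    simp only [List.foldl_cons]
    have hd' : ∀ c, d.getD c [] = pvDesc arr ((m : Int) + 1) c := by
      intro c; rw [hd]; push_cast; rfl
    rw [pv_step arr m (by omega) d cs hd']
    rw [ih (by omega) _ _ (fun c => by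
      rw [PySem.Dict.getD_insert, pv_desc_cons arr m (by omega) c]
      by_cases h : c = pvFc arr (m : Int)
      · rw [if_pos h, if_pos h.symm, hd' (pvFc arr (m : Int)), h]
      · rw [if_neg h, if_neg (fun hc => h hc.symm), hd' c])]
    have hsplit : PySem.List.pyRange 0 (((m : Nat) + 1 : Nat) : Int) 1
        = PySem.List.pyRange 0 (m : Int) 1 ++ [(m : Int)] := by
      push_cast
      exact PySem.List.pyRange_one_succ_right (by omega)
    rw [hsplit]
    simp

-- ===== VERDICT (by name: the statement is the Claim_ definition above) =====
theorem dnaSequence_spec : Claim_equal_dnaSequence := by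
  intro arr _ hpre
  unfold Spec_dnaSequence dnaSequence dnaSequence_alt
  apply String.toList_inj.mp
  rw [pv_outerA arr hpre _ "" (fun i hi => by
    have := (PySem.List.mem_pyRange_one).mp hi; constructor <;> omega)]
  rw [pv_foldB arr arr.length (le_refl _) PySem.Dict.empty []
      (fun c => by simp [PySem.Dict.getD_empty, pvDesc])]
  rw [List.nil_append, List.reverse_reverse, pv_join_nil_toList]
  simp [List.flatMap, List.map_map, Function.comp_def]
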